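-- pv_equiv track=rewrite | github.com/stolniceanudenisa/Public-key-cryptography | Lab/ContinuousFractionsMethod/main.py | compute_valid_b_vector_sums
-- ===== SOURCE A (Python) =====
-- import itertools
-- import copy
--
-- def compute_b_vectors_mod_2(b_vectors):
--     b_vectors_mod_2 = copy.deepcopy(b_vectors)
--     for vector in b_vectors_mod_2:
--         for i in range(len(vector)):
--             if vector[i] % 2 == 0:
--                 vector[i] = False
--             else:
--                 vector[i] = True
--     return b_vectors_mod_2
--
-- def compute_valid_b_vector_sums(b_vectors):
--     b_vectors_mod_2 = compute_b_vectors_mod_2(b_vectors)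
--     elements = []
--     b_vectors_combinations = []
--     for i in range(len(b_vectors_mod_2)):
--         elements.append(i)
--     for k in range(1, len(b_vectors_mod_2) + 1):
--         combinations = list(itertools.combinations(elements, k))
--
--         zero_list = [False] * len(b_vectors_mod_2[0])
--         for combination in combinations:
--             res = [False] * len(b_vectors_mod_2[0])
--             for comb_index in combination:
--                 for index in range(len(b_vectors_mod_2[0])):
--                     res[index] = res[index] ^ b_vectors_mod_2[comb_index][index]
--             if zero_list == res:
--                 b_vectors_combinations.append(combination)
--     return b_vectors_combinations
-- ===== SOURCE B (Python) =====
-- def compute_valid_b_vector_sums(b_vectors):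
--     # Meet-in-the-middle: split indices into halves, index all right-half subsets
--     # by their packed XOR value in a dict, join each left-half subset against its
--     # matching bucket, then sort results by (size, lexicographic indices).
--     n = len(b_vectors)
--     if n == 0:
--         return []
--     w = len(b_vectors[0])
--     masks = []
--     for v in b_vectors:
--         m = 0
--         for x in reversed(v[:w]):
--             m = 2 * m + (x % 2)
--         masks.append(m)
--     h = n // 2
--     r = n - h
--     table = {}
--     for s in range(1 << r):
--         acc = 0
--         idxs = []
--         for j in range(r):
--             if (s >> j) & 1:
--                 acc ^= masks[h + j]
--                 idxs.append(h + j)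
--         table.setdefault(acc, []).append(tuple(idxs))
--     results = []
--     for s in range(1 << h):
--         acc = 0
--         left = []
--         for j in range(h):
--             if (s >> j) & 1:
--                 acc ^= masks[j]
--                 left.append(j)
--         for right in table.get(acc, []):
--             c = tuple(left) + right
--             if c:
--                 results.append(c)
--     results.sort(key=lambda c: (len(c),) + c)
--     return results
-- ===== Notes on version B (the rewrite author's own statement) =====
-- stated objective: faster
-- what changed: Meet-in-the-middle hash join: B splits the indices into two halves, builds a dict from packed XOR value to the right-half subsets attaining it, and joins each left-half subset against its matching bucket, then sorts by (size, lex) - instead of A's enumeration of every combination of every size with a per-combination coordinate-wise XOR recomputed from scratch.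
import Mathlib
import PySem

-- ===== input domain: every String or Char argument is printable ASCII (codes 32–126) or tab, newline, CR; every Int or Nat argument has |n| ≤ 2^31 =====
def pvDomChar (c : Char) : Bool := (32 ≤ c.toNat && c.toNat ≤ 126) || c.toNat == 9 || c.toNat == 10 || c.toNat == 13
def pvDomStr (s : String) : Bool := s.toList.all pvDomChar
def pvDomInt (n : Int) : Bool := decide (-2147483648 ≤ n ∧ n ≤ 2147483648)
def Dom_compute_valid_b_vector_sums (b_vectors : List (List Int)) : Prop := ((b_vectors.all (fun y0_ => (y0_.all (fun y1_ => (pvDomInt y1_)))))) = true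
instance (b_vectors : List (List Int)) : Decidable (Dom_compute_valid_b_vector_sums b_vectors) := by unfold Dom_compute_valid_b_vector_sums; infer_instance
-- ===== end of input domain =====

-- B replaces A's enumeration of all combinations of every size (with a per-combination
-- coordinate-wise XOR) by a meet-in-the-middle hash join: the right half's subsets are
-- indexed by packed XOR value in a dict, each left-half subset is joined against its
-- matching bucket, and the results are sorted by (size, lex); objective: faster.

-- ===== PORT A =====
-- compute_b_vectors_mod_2: the in-place per-entry rewrite of the deepcopy, as a map
def pvMod2 (b_vectors : List (List Int)) : List (List Bool) :=
  b_vectors.map (fun vector => vector.map (fun x => if PySem.Int.mod x 2 == 0 then false else true))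

-- the inner 'for index in range(len(b_vectors_mod_2[0])): res[index] = res[index] ^ …' loop
-- (pyGetD is exact here: under Pre_ every index is in range, as in the Python)
def pvResStep (mod2 : List (List Bool)) (w : Int) (res : List Bool) (comb_index : Int) : List Bool :=
  (PySem.List.pyRange 0 w 1).foldl (fun res index =>
    res.set index.toNat ((PySem.List.pyGetD res index false).xor
      (PySem.List.pyGetD (PySem.List.pyGetD mod2 comb_index []) index false))) res

def compute_valid_b_vector_sums (b_vectors : List (List Int)) : List (List Int) :=
  let b_vectors_mod_2 := pvMod2 b_vectors
  let elements := (PySem.List.pyRange 0 (b_vectors_mod_2.length : Int) 1).foldl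
    (fun acc i => acc ++ [i]) []
  (PySem.List.pyRange 1 ((b_vectors_mod_2.length : Int) + 1) 1).foldl
    (fun b_vectors_combinations k =>
      let combinations := PySem.List.combinations elements k.toNat
      let w : Int := ((PySem.List.pyGetD b_vectors_mod_2 0 []).length : Int)
      let zero_list := List.replicate w.toNat false
      combinations.foldl (fun acc combination =>
        let res := combination.foldl (fun res comb_index =>
          pvResStep b_vectors_mod_2 w res comb_index) (List.replicate w.toNat false)
        if zero_list == res then acc ++ [combination] else acc) b_vectors_combinations) []

-- ===== PORT B =====
-- 'for x in reversed(v[:w]): m = 2*m + (x % 2)'  (w ≥ 0, so the slice v[:w] is take w)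
def pvMask (w : Nat) (v : List Int) : Nat :=
  ((v.take w).reverse).foldl (fun m x => 2 * m + (PySem.Int.mod x 2).toNat) 0

-- 'acc = 0; idxs = []; for j in range(cnt): if (s >> j) & 1: acc ^= masks[off+j]; idxs.append(off+j)'
def pvScan (masks : List Nat) (off cnt s : Nat) : Nat × List Int :=
  (List.range cnt).foldl
    (fun (p : Nat × List Int) j =>
      if (s >>> j) &&& 1 == 1 then (p.1 ^^^ masks.getD (off + j) 0, p.2 ++ [Int.ofNat (off + j)])
      else p) (0, [])

-- 'for s in range(1 << r): … table.setdefault(acc, []).append(tuple(idxs))'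
def pvTable (masks : List Nat) (h r : Nat) : PySem.Dict Nat (List (List Int)) :=
  (List.range (2 ^ r)).foldl
    (fun d s =>
      let p := pvScan masks h r s
      d.modify p.1 [] (· ++ [p.2])) PySem.Dict.empty

def compute_valid_b_vector_sums_alt (b_vectors : List (List Int)) : List (List Int) :=
  let n := b_vectors.length
  if n == 0 then []
  else
    let w := (b_vectors.headD []).length
    let masks := b_vectors.map (pvMask w)
    let h := n / 2
    let r := n - h
    let table := pvTable masks h r
    let results := (List.range (2 ^ h)).foldl
      (fun results s =>
        let p := pvScan masks 0 h s
        (table.getD p.1 []).foldl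
          (fun results right =>
            if p.2 ++ right ≠ [] then results ++ [p.2 ++ right] else results) results) []
    -- sort key '(len(c),) + c' = the int tuple (len c) :: c, compared lexicographically
    PySem.List.sorted results (fun c => ((c.length : Int) :: c)) false

-- ===== PRECONDITION & SPEC =====
-- Pre_ excludes ragged inputs whose first vector is longer than some other vector:
-- there the Python A raises IndexError.
def Pre_compute_valid_b_vector_sums (b_vectors : List (List Int)) : Prop :=
  ∀ v ∈ b_vectors, (b_vectors.headD []).length ≤ v.length
instance (b_vectors : List (List Int)) : Decidable (Pre_compute_valid_b_vector_sums b_vectors) := by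
  unfold Pre_compute_valid_b_vector_sums; infer_instance

def pvWitness_compute_valid_b_vector_sums : List (List Int) := [[1, 2], [3, 4], [1, 2]]

def Spec_compute_valid_b_vector_sums (b_vectors : List (List Int)) (out : List (List Int)) : Prop := out = compute_valid_b_vector_sums_alt b_vectors
instance (b_vectors : List (List Int)) (out : List (List Int)) : Decidable (Spec_compute_valid_b_vector_sums b_vectors out) := by unfold Spec_compute_valid_b_vector_sums; infer_instance

-- ===== CLAIM (what is proved, stated in full; the proofs are below) =====
def Claim_equal_compute_valid_b_vector_sums : Prop := ∀ (b_vectors : List (List Int)), Dom_compute_valid_b_vector_sums b_vectors → Pre_compute_valid_b_vector_sums b_vectors → Spec_compute_valid_b_vector_sums b_vectors (compute_valid_b_vector_sums b_vectors)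

-- ===== LEMMAS AND PROOFS =====

def pvBit (x : Int) : Bool := if PySem.Int.mod x 2 == 0 then false else true

def pvEnc (bs : List Bool) : Nat := bs.foldr (fun b m => 2 * m + b.toNat) 0

theorem pvEnc_cons (b : Bool) (bs : List Bool) : pvEnc (b :: bs) = Nat.bit b (pvEnc bs) := by
  simp [pvEnc, Nat.bit_val, Nat.mul_comm]

theorem pvEnc_xor : ∀ (u v : List Bool), u.length = v.length →
    pvEnc (List.zipWith xor u v) = pvEnc u ^^^ pvEnc v := by
  intro u
  induction u with
  | nil =>
    intro v h
    have : v = [] := by simpa using (List.length_eq_zero_iff.mp h.symm)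
    simp [this, pvEnc]
  | cons a u ih =>
    intro v h
    cases v with
    | nil => simp at h
    | cons b v =>
      simp only [List.zipWith_cons_cons, pvEnc_cons, ih v (by simpa using h), Nat.xor_bit]

theorem pvEnc_eq_zero : ∀ (u : List Bool), (pvEnc u = 0 ↔ u = List.replicate u.length false) := by
  intro u
  induction u with
  | nil => simp [pvEnc]
  | cons a u ih =>
    rw [pvEnc_cons, List.length_cons, List.replicate_succ, Nat.bit_eq_zero_iff]
    constructor
    · rintro ⟨hb, hn⟩
      rw [hn]
      exact congrArg _ (ih.mp hb)
    · intro h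
      rw [List.cons_eq_cons] at h
      exact ⟨ih.mpr h.2, h.1⟩

theorem pvFoldSet (v : List Bool) : ∀ (w : Nat) (r : List Bool), w ≤ r.length → w ≤ v.length →
    (PySem.List.pyRange 0 (w : Int) 1).foldl (fun res index =>
      res.set index.toNat ((PySem.List.pyGetD res index false).xor
        (PySem.List.pyGetD v index false))) r
    = List.zipWith xor (r.take w) (v.take w) ++ r.drop w := by
  intro w
  induction w with
  | zero => intro r _ _; simp [PySem.List.pyRange_one_eq_nil]
  | succ w ih =>
    intro r hr hv
    have hw : ((w + 1 : Nat) : Int) = (w : Int) + 1 := by push_cast; ring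
    have hsplit : PySem.List.pyRange 0 ((w + 1 : Nat) : Int) 1
        = PySem.List.pyRange 0 (w : Int) 1 ++ [(w : Int)] := by
      rw [hw, PySem.List.pyRange_one_succ_right (by positivity)]
    rw [hsplit, List.foldl_append, ih r (by omega) (by omega)]
    have hwr : w < r.length := by omega
    have hwv : w < v.length := by omega
    have hlenA : (List.zipWith xor (r.take w) (v.take w)).length = w := by
      simp [List.length_zipWith]; omega
    have hdrop : r.drop w = r[w] :: r.drop (w + 1) := by
      rw [List.drop_eq_getElem_cons hwr]
    have hA := List.length_take_of_le (le_of_lt hwr)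
    have hget : PySem.List.pyGetD (List.zipWith xor (r.take w) (v.take w) ++ r.drop w) ((w : Int)) false
        = r[w] := by
      rw [PySem.List.pyGetD_natCast, hdrop]
      rw [List.getD_eq_getElem _ _ (by simp [hlenA]; omega)]
      rw [List.getElem_append_right (by omega)]
      simp [hlenA]
    have hgetv : PySem.List.pyGetD v ((w : Int)) false = v[w] := by
      rw [PySem.List.pyGetD_natCast, List.getD_eq_getElem _ _ hwv]
    simp only [List.foldl_cons, List.foldl_nil]
    rw [hget, hgetv, Int.toNat_natCast]
    rw [List.set_append_right _ _ (by omega), hlenA, Nat.sub_self, hdrop, List.set_cons_zero]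
    have h1 : r.take (w + 1) = r.take w ++ [r[w]] := by
      rw [List.take_add_one]
      simp [List.getElem?_eq_getElem hwr]
    have h2 : v.take (w + 1) = v.take w ++ [v[w]] := by
      rw [List.take_add_one]
      simp [List.getElem?_eq_getElem hwv]
    rw [h1, h2, List.zipWith_append (by rw [hA, List.length_take_of_le (le_of_lt hwv)])]
    simp

theorem pvNodupCombinations {α : Type} [DecidableEq α] :
    ∀ (l : List α), l.Nodup → ∀ (r : Nat), (PySem.List.combinations l r).Nodup := by
  intro l
  induction l with
  | nil =>
    intro _ r
    cases r with
    | zero => simp [PySem.List.combinations_zero]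
    | succ r => simp [PySem.List.combinations_nil_succ]
  | cons x xs ih =>
    intro hnd r
    have hx : x ∉ xs := (List.nodup_cons.mp hnd).1
    have hxs : xs.Nodup := (List.nodup_cons.mp hnd).2
    cases r with
    | zero => simp [PySem.List.combinations_zero]
    | succ r =>
      rw [PySem.List.combinations_cons_succ, List.nodup_append]
      refine ⟨(List.nodup_map_iff (fun a b h => by simpa using h)).mpr (ih hxs r), ih hxs (r+1), ?_⟩
      intro c hc c' hc' heq
      subst heq
      obtain ⟨d, _, rfl⟩ := List.mem_map.mp hc
      have hsub := PySem.List.sublist_of_mem_combinations hc'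
      exact hx (hsub.subset (by simp))

theorem pvLengthCombinations {α : Type} :
    ∀ (l : List α) (r : Nat), (PySem.List.combinations l r).length = l.length.choose r := by
  intro l
  induction l with
  | nil =>
    intro r
    cases r with
    | zero => simp [PySem.List.combinations_zero]
    | succ r => simp [PySem.List.combinations_nil_succ]
  | cons x xs ih =>
    intro r
    cases r with
    | zero => simp [PySem.List.combinations_zero]
    | succ r =>
      rw [PySem.List.combinations_cons_succ]
      simp [ih r, ih (r+1), Nat.choose_succ_succ]

theorem pvPairwiseLexCombinations :
    ∀ (l : List Int), l.Pairwise (· < ·) →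
      ∀ (r : Nat), (PySem.List.combinations l r).Pairwise (fun a b => List.Lex (· < ·) a b) := by
  intro l
  induction l with
  | nil =>
    intro _ r
    cases r with
    | zero => simp [PySem.List.combinations_zero]
    | succ r => simp [PySem.List.combinations_nil_succ]
  | cons x xs ih =>
    intro hpw r
    have hlt : ∀ y ∈ xs, x < y := fun y hy => List.rel_of_pairwise_cons hpw hy
    have hxs : xs.Pairwise (· < ·) := (List.pairwise_cons.mp hpw).2
    cases r with
    | zero => simp [PySem.List.combinations_zero]
    | succ r =>
      rw [PySem.List.combinations_cons_succ, List.pairwise_append]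
      refine ⟨List.pairwise_map.mpr ?_, ih hxs (r+1), ?_⟩
      · exact (ih hxs r).imp (fun h => List.Lex.cons h)
      · intro c hc c' hc'
        obtain ⟨d, _, rfl⟩ := List.mem_map.mp hc
        have hlen := PySem.List.length_of_mem_combinations hc'
        have hsub := PySem.List.sublist_of_mem_combinations hc'
        cases c' with
        | nil => simp at hlen
        | cons y t =>
          exact List.Lex.rel (hlt y (hsub.subset (by simp)))

def pvE (n : Nat) : List Int := (List.range n).map Int.ofNat

def pvAun (n : Nat) : List (List Int) :=
  (List.range n).flatMap (fun k => PySem.List.combinations (pvE n) (k + 1))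

def pvXorsum (masks : List Nat) (c : List Int) : Nat :=
  c.foldl (fun acc ci => acc ^^^ masks.getD ci.toNat 0) 0

def pvIdxsO (off cnt s : Nat) : List Int :=
  ((List.range cnt).filter (fun j => (s >>> j) &&& 1 == 1)).map (fun j => Int.ofNat (off + j))

def pvValO (masks : List Nat) (off cnt s : Nat) : Nat :=
  ((List.range cnt).filter (fun j => (s >>> j) &&& 1 == 1)).foldl
    (fun a j => a ^^^ masks.getD (off + j) 0) 0

def pvFull (h r : Nat) : List (List Int) :=
  (List.range (2 ^ h)).flatMap
    (fun sl => (List.range (2 ^ r)).map (fun t => pvIdxsO 0 h sl ++ pvIdxsO h r t))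

theorem pvTestBit (s i : Nat) : ((s >>> i) &&& 1 == 1) = s.testBit i := by
  simp [Nat.testBit]

theorem pvNodupFlat (n : Nat) (m : Nat) :
    ((List.range m).flatMap (fun k => PySem.List.combinations (pvE n) (k + 1))).Nodup := by
  have hE : (pvE n).Nodup := by
    exact (List.nodup_map_iff
      (fun a b h => by simpa using h : Function.Injective Int.ofNat)).mpr
      List.nodup_range
  induction m with
  | zero => simp
  | succ m ih =>
    rw [List.range_succ, List.flatMap_append, List.nodup_append]
    refine ⟨ih, by simpa using pvNodupCombinations _ hE _, ?_⟩
    intro c hc c' hc' hcc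
    subst hcc
    obtain ⟨k, hk, hck⟩ := List.mem_flatMap.mp hc
    have h1 := PySem.List.length_of_mem_combinations hck
    simp at hc'
    have h2 := PySem.List.length_of_mem_combinations hc'
    have := List.mem_range.mp hk
    omega

theorem pvSumFinsetList (n : Nat) (f : Nat → Nat) :
    ∑ i ∈ Finset.range n, f i = ((List.range n).map f).sum := rfl

theorem pvAunLen (n : Nat) : (pvAun n).length = 2 ^ n - 1 := by
  unfold pvAun
  rw [List.length_flatMap]
  have : (List.map (fun k => (PySem.List.combinations (pvE n) (k + 1)).length) (List.range n))
      = (List.range n).map (fun k => n.choose (k + 1)) := by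
    apply List.map_congr_left
    intro k _
    rw [pvLengthCombinations]
    simp [pvE]
  rw [this, ← pvSumFinsetList]
  have h0 := Nat.sum_range_choose n
  have h1 : ∑ i ∈ Finset.range (n + 1), n.choose i
      = (∑ i ∈ Finset.range n, n.choose (i + 1)) + n.choose 0 := Finset.sum_range_succ' _ _
  simp at h1
  omega

theorem pvMemAun (n : Nat) (c : List Int) :
    c ∈ pvAun n ↔ c.Sublist (pvE n) ∧ c ≠ [] := by
  unfold pvAun
  rw [List.mem_flatMap]
  constructor
  · rintro ⟨k, hk, hc⟩
    have h1 := (PySem.List.mem_combinations_iff _ _ _).mp hc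
    refine ⟨h1.1, ?_⟩
    intro h
    rw [h] at h1
    simp at h1
  · rintro ⟨hsub, hne⟩
    have hlen : c.length ≤ n := by
      have := hsub.length_le
      simpa [pvE] using this
    have hpos : 0 < c.length := List.length_pos_of_ne_nil hne
    refine ⟨c.length - 1, List.mem_range.mpr (by omega), ?_⟩
    exact (PySem.List.mem_combinations_iff _ _ _).mpr ⟨hsub, by omega⟩

theorem pvScan_eq (masks : List Nat) (off s : Nat) : ∀ (cnt : Nat),
    pvScan masks off cnt s = (pvValO masks off cnt s, pvIdxsO off cnt s) := by
  intro cnt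
  induction cnt with
  | zero => rfl
  | succ c ih =>
    unfold pvScan pvValO pvIdxsO at ih ⊢
    rw [List.range_succ, List.foldl_append, ih]
    by_cases hb : s >>> c % 2 = 1
    · simp [Nat.and_one_is_mod, hb, List.filter_append, List.foldl_append]
    · simp [Nat.and_one_is_mod, hb, List.filter_append]

theorem pvFoldXorInit {α : Type} (f : α → Nat) : ∀ (l : List α) (a : Nat),
    l.foldl (fun x i => x ^^^ f i) a = a ^^^ l.foldl (fun x i => x ^^^ f i) 0 := by
  intro l
  induction l with
  | nil => intro a; simp
  | cons x t ih =>
    intro a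
    simp only [List.foldl_cons, Nat.zero_xor]
    rw [ih (a ^^^ f x), ih (f x), Nat.xor_assoc]

theorem pvXorsum_append (masks : List Nat) (c1 c2 : List Int) :
    pvXorsum masks (c1 ++ c2) = pvXorsum masks c1 ^^^ pvXorsum masks c2 := by
  unfold pvXorsum
  rw [List.foldl_append, pvFoldXorInit]

theorem pvXorsum_idxsO (masks : List Nat) (off cnt s : Nat) :
    pvXorsum masks (pvIdxsO off cnt s) = pvValO masks off cnt s := by
  unfold pvXorsum pvIdxsO pvValO
  rw [List.foldl_map]
  rfl

theorem pvMemIdxsO (off cnt s i : Nat) :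
    (Int.ofNat (off + i) ∈ pvIdxsO off cnt s) ↔ (i < cnt ∧ s.testBit i = true) := by
  unfold pvIdxsO
  rw [List.mem_map]
  constructor
  · rintro ⟨j, hj, hji⟩
    have hji' : off + j = off + i := Int.ofNat.inj hji
    have hj' : j = i := by omega
    subst hj'
    have hf := List.mem_filter.mp hj
    exact ⟨List.mem_range.mp hf.1, by rw [← pvTestBit]; exact hf.2⟩
  · rintro ⟨hi, hb⟩
    exact ⟨i, List.mem_filter.mpr ⟨List.mem_range.mpr hi, by rw [pvTestBit]; exact hb⟩, rfl⟩

theorem pvIdxsO_inj (off cnt s t : Nat) (hs : s < 2 ^ cnt) (ht : t < 2 ^ cnt)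
    (h : pvIdxsO off cnt s = pvIdxsO off cnt t) : s = t := by
  apply Nat.eq_of_testBit_eq
  intro i
  by_cases hi : i < cnt
  · have hsi := pvMemIdxsO off cnt s i
    rw [h] at hsi
    have hiff : (s.testBit i = true) ↔ (t.testBit i = true) := by
      constructor
      · intro hb; exact ((pvMemIdxsO off cnt t i).mp (hsi.mpr ⟨hi, hb⟩)).2
      · intro hb; exact (hsi.mp ((pvMemIdxsO off cnt t i).mpr ⟨hi, hb⟩)).2
    cases hbs : s.testBit i
    · cases hbt : t.testBit i
      · rfl
      · exact absurd (hiff.mpr hbt) (by simp [hbs])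
    · rw [hiff.mp hbs]
  · rw [Nat.testBit_eq_false_of_lt (lt_of_lt_of_le hs (Nat.pow_le_pow_right (by norm_num) (by omega))),
        Nat.testBit_eq_false_of_lt (lt_of_lt_of_le ht (Nat.pow_le_pow_right (by norm_num) (by omega)))]

theorem pvMemIdxsO_bounds (off cnt s : Nat) (x : Int) (hx : x ∈ pvIdxsO off cnt s) :
    (off : Int) ≤ x ∧ x < ((off + cnt : Nat) : Int) := by
  unfold pvIdxsO at hx
  obtain ⟨j, hj, rfl⟩ := List.mem_map.mp hx
  have hjr := List.mem_range.mp (List.mem_filter.mp hj).1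
  simp only [Int.ofNat_eq_natCast]
  omega

theorem pvFilterRecover (h r sl t : Nat) :
    (pvIdxsO 0 h sl ++ pvIdxsO h r t).filter (fun x => decide (x < (h : Int)))
      = pvIdxsO 0 h sl := by
  rw [List.filter_append]
  have h1 : (pvIdxsO 0 h sl).filter (fun x => decide (x < (h : Int))) = pvIdxsO 0 h sl := by
    apply List.filter_eq_self.mpr
    intro x hx
    have hb := pvMemIdxsO_bounds 0 h sl x hx
    simp only [decide_eq_true_eq]
    omega
  have h2 : (pvIdxsO h r t).filter (fun x => decide (x < (h : Int))) = [] := by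
    apply List.filter_eq_nil_iff.mpr
    intro x hx
    have hb := pvMemIdxsO_bounds h r t x hx
    simp only [decide_eq_true_eq, not_lt]
    omega
  rw [h1, h2, List.append_nil]

theorem pvNodupFull (h r : Nat) : (pvFull h r).Nodup := by
  unfold pvFull
  rw [List.nodup_flatMap]
  constructor
  · intro sl _
    refine List.Nodup.map_on ?_ List.nodup_range
    intro t1 h1 t2 h2 heq
    exact pvIdxsO_inj h r t1 t2 (List.mem_range.mp h1) (List.mem_range.mp h2)
      (List.append_cancel_left heq)
  · refine List.Nodup.pairwise_of_forall_ne List.nodup_range ?_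
    intro a ha b hb hab c hca hcb
    obtain ⟨t1, _, hc1⟩ := List.mem_map.mp hca
    obtain ⟨t2, _, hc2⟩ := List.mem_map.mp hcb
    rw [← hc2] at hc1
    have hl := congrArg (List.filter (fun x => decide (x < (h : Int)))) hc1
    rw [pvFilterRecover, pvFilterRecover] at hl
    exact hab (pvIdxsO_inj 0 h a b (List.mem_range.mp ha) (List.mem_range.mp hb) hl)

theorem pvLenFull (h r : Nat) : (pvFull h r).length = 2 ^ (h + r) := by
  unfold pvFull
  rw [List.length_flatMap]
  simp [Nat.pow_add]

theorem pvE_split (h r : Nat) :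
    pvE (h + r) = pvE h ++ (List.range r).map (fun j => Int.ofNat (h + j)) := by
  unfold pvE
  rw [List.range_add, List.map_append, List.map_map]
  rfl

theorem pvIdxsO_zero (cnt s : Nat) :
    pvIdxsO 0 cnt s = ((List.range cnt).filter (fun j => (s >>> j) &&& 1 == 1)).map Int.ofNat := by
  unfold pvIdxsO
  refine List.map_congr_left ?_
  intro j _
  rw [Nat.zero_add]

theorem pvFull_subset (h r : Nat) : pvFull h r ⊆ ([] :: pvAun (h + r)) := by
  intro c hc
  unfold pvFull at hc
  obtain ⟨sl, _, hc2⟩ := List.mem_flatMap.mp hc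
  obtain ⟨t, _, rfl⟩ := List.mem_map.mp hc2
  by_cases hnil : pvIdxsO 0 h sl ++ pvIdxsO h r t = []
  · rw [hnil]
    exact List.mem_cons_self
  · refine List.mem_cons_of_mem _ ?_
    refine (pvMemAun _ _).mpr ⟨?_, hnil⟩
    rw [pvE_split]
    refine List.Sublist.append ?_ ?_
    · rw [pvIdxsO_zero]
      exact List.Sublist.map _ List.filter_sublist
    · exact List.Sublist.map _ List.filter_sublist

theorem pvPermFull (h r : Nat) : (pvFull h r).Perm ([] :: pvAun (h + r)) := by
  have hnodup : ([] :: pvAun (h + r)).Nodup := by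
    rw [List.nodup_cons]
    refine ⟨?_, pvNodupFlat (h + r) (h + r)⟩
    intro hmem
    exact ((pvMemAun _ _).mp hmem).2 rfl
  refine ((pvNodupFull h r).subperm (pvFull_subset h r)).perm_of_length_le ?_
  rw [pvLenFull, List.length_cons, pvAunLen]
  have h1 : 1 ≤ 2 ^ (h + r) := Nat.one_le_two_pow
  omega

theorem pvTable_getD (masks : List Nat) (h r acc : Nat) :
    (pvTable masks h r).getD acc []
      = ((List.range (2 ^ r)).filter (fun t => (pvScan masks h r t).1 == acc)).map
          (fun t => (pvScan masks h r t).2) := by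
  unfold pvTable
  have h1 : ((List.range (2 ^ r)).foldl
      (fun d s =>
        let p := pvScan masks h r s
        d.modify p.1 [] (· ++ [p.2])) PySem.Dict.empty)
      = (((List.range (2 ^ r)).map (fun s => ((pvScan masks h r s).1, (pvScan masks h r s).2))).foldl
          (fun d p => d.modify p.1 [] (· ++ [p.2])) PySem.Dict.empty) := by
    rw [List.foldl_map]
  rw [h1, PySem.Dict.getD_foldl_modify_append, PySem.Dict.getD_empty, List.filter_map,
    List.map_map]
  rfl

-- the B-side predicate after the join: 'part of a zero-XOR pair and nonempty'
def pvPred (masks : List Nat) (c : List Int) : Bool :=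
  (pvXorsum masks c == 0) && decide (c ≠ [])

theorem pvInner_eq (masks : List Nat) (h r sl : Nat) :
    ((((List.range (2 ^ r)).filter (fun t => pvValO masks h r t == pvValO masks 0 h sl)).map
        (fun t => pvIdxsO h r t)).filter
          (fun right => decide (pvIdxsO 0 h sl ++ right ≠ []))).map
            (fun right => pvIdxsO 0 h sl ++ right)
      = ((List.range (2 ^ r)).map (fun t => pvIdxsO 0 h sl ++ pvIdxsO h r t)).filter
          (pvPred masks) := by
  rw [List.filter_map, List.map_map, List.filter_filter, List.filter_map]
  apply congrArg
  apply List.filter_congr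
  intro t _
  simp only [Function.comp]
  have hx : pvXorsum masks (pvIdxsO 0 h sl ++ pvIdxsO h r t)
      = pvValO masks 0 h sl ^^^ pvValO masks h r t := by
    rw [pvXorsum_append, pvXorsum_idxsO, pvXorsum_idxsO]
  unfold pvPred
  rw [hx]
  rw [Bool.eq_iff_iff]
  simp only [Bool.and_eq_true, decide_eq_true_eq, beq_iff_eq, Nat.xor_eq_zero_iff]
  constructor
  · rintro ⟨hne, hv⟩
    exact ⟨hv.symm, hne⟩
  · rintro ⟨hv, hne⟩
    exact ⟨hne, hv.symm⟩

theorem pvBside (v : List Int) (bs : List (List Int)) :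
    compute_valid_b_vector_sums_alt (v :: bs)
      = PySem.List.sorted
          ((pvFull ((bs.length + 1) / 2) (bs.length + 1 - (bs.length + 1) / 2)).filter
            (pvPred ((v :: bs).map (pvMask v.length))))
          (fun c => ((c.length : Int) :: c)) false := by
  simp only [compute_valid_b_vector_sums_alt, List.length_cons, List.headD_cons]
  rw [if_neg (by simp)]
  apply congrArg (fun l => PySem.List.sorted l (fun c : List Int => ((c.length : Int) :: c)) false)
  simp only [pvScan_eq, pvTable_getD]
  simp only [PySem.List.foldl_append_ite, PySem.List.foldl_append_eq_flatMap, List.nil_append]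
  simp only [pvInner_eq]
  rw [← List.filter_flatMap]
  rfl

-- ===== A-side bridge lemmas (unchanged from the literal reading of A) =====

theorem pvMask_eq_enc (w : Nat) (v : List Int) :
    pvMask w v = pvEnc ((v.map pvBit).take w) := by
  unfold pvMask
  rw [List.foldl_reverse, ← List.map_take]
  induction (v.take w) with
  | nil => simp [pvEnc]
  | cons x t ih =>
    simp only [List.foldr_cons, List.map_cons, pvEnc, List.foldr_cons] at *
    rw [ih]
    have h2 : (PySem.Int.mod x 2).toNat = (pvBit x).toNat := by
      unfold pvBit
      rcases PySem.Int.mod_two_eq x with h | h <;> rw [h] <;> rfl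
    omega

theorem pvVx_length (M : List (List Bool)) (w : Nat) :
    ∀ (c : List Int) (r : List Bool), r.length = w →
      (∀ ci ∈ c, w ≤ (M.getD ci.toNat []).length) →
      (c.foldl (fun r ci => List.zipWith xor r ((M.getD ci.toNat []).take w)) r).length = w := by
  intro c
  induction c with
  | nil => intro r hr _; simpa using hr
  | cons ci c ih =>
    intro r hr hrow
    simp only [List.foldl_cons]
    refine ih _ ?_ (fun x hx => hrow x (by simp [hx]))
    have h1 := hrow ci (by simp)
    rw [List.length_zipWith, List.length_take, hr]
    omega

theorem pvVx_enc (M : List (List Bool)) (w : Nat) (masks : List Nat)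
    (hmask : ∀ (i : Nat), i < M.length → masks.getD i 0 = pvEnc ((M.getD i []).take w)) :
    ∀ (c : List Int) (r : List Bool), r.length = w →
      (∀ ci ∈ c, ci.toNat < M.length ∧ w ≤ (M.getD ci.toNat []).length) →
      pvEnc (c.foldl (fun r ci => List.zipWith xor r ((M.getD ci.toNat []).take w)) r)
        = c.foldl (fun acc ci => acc ^^^ masks.getD ci.toNat 0) (pvEnc r) := by
  intro c
  induction c with
  | nil => intro r _ _; simp
  | cons ci c ih =>
    intro r hr hrow
    simp only [List.foldl_cons]
    rw [ih _ (by
        have h1 := (hrow ci (by simp)).2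
        rw [List.length_zipWith, List.length_take, hr]; omega)
      (fun x hx => hrow x (by simp [hx]))]
    congr 1
    rw [pvEnc_xor _ _ (by
        have h1 := (hrow ci (by simp)).2
        rw [List.length_take, hr]; omega)]
    rw [hmask ci.toNat (hrow ci (by simp)).1]

theorem pvToNatOfNat (m : Nat) : (Int.ofNat m).toNat = m := rfl

theorem pvRangeSucc (n : Nat) : PySem.List.pyRange 1 ((n : Int) + 1) 1
    = (List.range n).map (fun k => Int.ofNat (k + 1)) := by
  rw [PySem.List.pyRange_one]
  have h1 : ((n : Int) + 1 - 1).toNat = n := by omega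
  rw [h1]
  apply List.map_congr_left
  intro k _
  simp [Int.ofNat_eq_natCast]
  omega

theorem pvMod2_eq (l : List (List Int)) : pvMod2 l = l.map (List.map pvBit) := rfl

theorem pvMaskGetD (l : List (List Int)) (w : Nat) (i : Nat) :
    (l.map (pvMask w)).getD i 0 = pvEnc (((pvMod2 l).getD i []).take w) := by
  have h0 : pvMask w [] = 0 := by simp [pvMask]
  have h1 : (l.map (pvMask w)).getD i (pvMask w []) = pvMask w (l.getD i []) :=
    List.getD_map _ _ _
  rw [h0] at h1
  have h2 : (pvMod2 l).getD i [] = (l.getD i []).map pvBit := by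
    rw [pvMod2_eq]
    exact List.getD_map l ([] : List Int) (List.map pvBit)
  rw [h1, h2, pvMask_eq_enc]

theorem pvResStep_eq (M : List (List Bool)) (w : Nat) (res : List Bool) (i : Nat)
    (hres : res.length = w) (hrow : w ≤ (M.getD i []).length) :
    pvResStep M (w : Int) res (Int.ofNat i) = List.zipWith xor res ((M.getD i []).take w) := by
  unfold pvResStep
  have hM : PySem.List.pyGetD M (Int.ofNat i) [] = M.getD i [] := PySem.List.pyGetD_natCast M i []
  rw [hM, pvFoldSet (M.getD i []) w res (by omega) hrow]
  simp [← hres]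

theorem pvResFold (M : List (List Bool)) (w : Nat) :
    ∀ (c : List Int) (r : List Bool), r.length = w →
      (∀ ci ∈ c, ∃ i : Nat, ci = Int.ofNat i ∧ w ≤ (M.getD i []).length) →
      c.foldl (fun res ci => pvResStep M (w : Int) res ci) r
        = c.foldl (fun r ci => List.zipWith xor r ((M.getD ci.toNat []).take w)) r := by
  intro c
  induction c with
  | nil => intro r _ _; rfl
  | cons ci c ih =>
    intro r hr hc
    obtain ⟨i, rfl, hrow⟩ := hc ci (by simp)
    simp only [List.foldl_cons]
    rw [pvResStep_eq M w r i hr hrow]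
    have : (Int.ofNat i).toNat = i := rfl
    rw [this]
    refine ih _ ?_ (fun x hx => hc x (by simp [hx]))
    rw [List.length_zipWith, List.length_take, hr]
    omega

theorem pvElements (n : Nat) :
    (PySem.List.pyRange 0 (n : Int) 1).foldl (fun acc i => acc ++ [i]) [] = pvE n := by
  rw [PySem.List.foldl_append_singleton_eq_self, PySem.List.pyRange_one]
  simp [pvE]

theorem pvAside (v : List Int) (bs : List (List Int))
    (hpre : ∀ u ∈ v :: bs, v.length ≤ u.length) :
    compute_valid_b_vector_sums (v :: bs)
      = ((List.range (bs.length + 1)).flatMap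
          (fun k => PySem.List.combinations (pvE (bs.length + 1)) (k + 1))).filter
          (fun c => (c.foldl
              (fun acc ci => acc ^^^ ((v :: bs).map (pvMask v.length)).getD ci.toNat 0) 0 == 0)) := by
  have hMlen : (pvMod2 (v :: bs)).length = bs.length + 1 := by simp [pvMod2]
  have h0 : PySem.List.pyGetD (pvMod2 (v :: bs)) 0 [] = v.map pvBit := by
    rw [show pvMod2 (v :: bs) = (v.map pvBit) :: pvMod2 bs from rfl]
    exact PySem.List.pyGetD_zero_cons _ _ _
  simp only [compute_valid_b_vector_sums, hMlen, h0, List.length_map]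
  rw [pvElements, pvRangeSucc, List.foldl_map]
  simp only [PySem.List.foldl_append_if_eq_filter]
  simp only [pvToNatOfNat, Int.toNat_natCast]
  rw [PySem.List.foldl_append_eq_flatMap]
  simp only [List.nil_append]
  rw [← List.filter_flatMap]
  apply List.filter_congr
  intro c hc
  obtain ⟨k, hk, hck⟩ := List.mem_flatMap.mp hc
  have hsub := PySem.List.sublist_of_mem_combinations hck
  have helem : ∀ ci ∈ c, ∃ i : Nat, ci = Int.ofNat i ∧ i < bs.length + 1 := by
    intro ci hci
    have hmem := hsub.subset hci
    unfold pvE at hmem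
    obtain ⟨i, hi, rfl⟩ := List.mem_map.mp hmem
    exact ⟨i, rfl, List.mem_range.mp hi⟩
  have hrow : ∀ i : Nat, i < bs.length + 1 → v.length ≤ ((pvMod2 (v :: bs)).getD i []).length := by
    intro i hi
    have h2 : (pvMod2 (v :: bs)).getD i [] = ((v :: bs).getD i []).map pvBit := by
      rw [pvMod2_eq]; exact List.getD_map _ ([] : List Int) (List.map pvBit)
    rw [h2, List.length_map]
    have hi' : i < (v :: bs).length := by simp; omega
    rw [List.getD_eq_getElem _ _ hi']
    exact hpre _ (List.getElem_mem hi')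
  have hc1 : ∀ ci ∈ c, ∃ i : Nat, ci = Int.ofNat i ∧ v.length ≤ ((pvMod2 (v :: bs)).getD i []).length := by
    intro ci hci
    obtain ⟨i, rfl, hi⟩ := helem ci hci
    exact ⟨i, rfl, hrow i hi⟩
  have hc2 : ∀ ci ∈ c, ci.toNat < (pvMod2 (v :: bs)).length ∧
      v.length ≤ ((pvMod2 (v :: bs)).getD ci.toNat []).length := by
    intro ci hci
    obtain ⟨i, rfl, hi⟩ := helem ci hci
    rw [pvToNatOfNat]
    exact ⟨by rw [hMlen]; omega, hrow i hi⟩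
  rw [pvResFold (pvMod2 (v :: bs)) v.length c (List.replicate v.length false) (by simp) hc1]
  have hmask : ∀ i : Nat, i < (pvMod2 (v :: bs)).length →
      ((v :: bs).map (pvMask v.length)).getD i 0
        = pvEnc (((pvMod2 (v :: bs)).getD i []).take v.length) :=
    fun i _ => pvMaskGetD (v :: bs) v.length i
  have hlenz := pvVx_length (pvMod2 (v :: bs)) v.length c (List.replicate v.length false)
    (by simp) (fun ci hci => (hc2 ci hci).2)
  have henc := pvVx_enc (pvMod2 (v :: bs)) v.length ((v :: bs).map (pvMask v.length)) hmask c
    (List.replicate v.length false) (by simp) hc2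
  have hz : pvEnc (List.replicate v.length false) = 0 := (pvEnc_eq_zero _).mpr (by simp)
  rw [hz] at henc
  rw [Bool.eq_iff_iff]
  simp only [beq_iff_eq]
  rw [← henc]
  constructor
  · intro h
    rw [← h]
    exact hz
  · intro h
    have h2 := (pvEnc_eq_zero _).mp h
    rw [h2, hlenz]

def pvKey (c : List Int) : List Int := ((c.length : Int)) :: c

theorem pvPairwiseT (n : Nat) : ∀ (m : Nat),
    ((List.range m).flatMap (fun k => PySem.List.combinations (pvE n) (k + 1))).Pairwise
      (fun a b => pvKey a < pvKey b) := by
  have hpe : (pvE n).Pairwise (· < ·) := by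
    unfold pvE
    rw [List.pairwise_map]
    exact List.pairwise_lt_range.imp (fun h => Int.ofNat_lt.mpr h)
  intro m
  induction m with
  | zero => simp
  | succ m ih =>
    rw [List.range_succ, List.flatMap_append, List.pairwise_append]
    refine ⟨ih, ?_, ?_⟩
    · simp only [List.flatMap_cons, List.flatMap_nil, List.append_nil]
      have hlex := pvPairwiseLexCombinations (pvE n) hpe (m + 1)
      refine hlex.imp_of_mem ?_
      intro a b ha hb hab
      have hla := PySem.List.length_of_mem_combinations ha
      have hlb := PySem.List.length_of_mem_combinations hb
      show List.Lex (· < ·) (pvKey a) (pvKey b)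
      unfold pvKey
      rw [hla, hlb]
      exact List.Lex.cons hab
    · intro a ha b hb
      obtain ⟨k, hk, hak⟩ := List.mem_flatMap.mp ha
      simp only [List.flatMap_cons, List.flatMap_nil, List.append_nil] at hb
      have hla := PySem.List.length_of_mem_combinations hak
      have hlb := PySem.List.length_of_mem_combinations hb
      have hkm := List.mem_range.mp hk
      show List.Lex (· < ·) (pvKey a) (pvKey b)
      unfold pvKey
      exact List.Lex.rel (by rw [hla, hlb]; exact_mod_cast (by omega : k + 1 < m + 1))

theorem pvSortedInst (xs : List (List Int)) (key : List Int → List Int) :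
    @PySem.List.sorted (List Int) (List Int) List.instLT (fun a b => a.decidableLT b) xs key false
      = @PySem.List.sorted (List Int) (List Int) List.instLinearOrder.toLT
          LinearOrder.toDecidableLT xs key false := by
  have hb : (fun a b : List Int => @decide (@LT.lt _ List.instLT (key a) (key b)) ((key a).decidableLT (key b)))
      = (fun a b : List Int => @decide (@LT.lt _ List.instLinearOrder.toLT (key a) (key b))
          (@LinearOrder.toDecidableLT _ _ (key a) (key b))) := by
    funext a b
    rw [decide_eq_decide]
  rw [@PySem.List.sorted_eq_foldl_insertBy (List Int) (List Int) List.instLT (fun a b => a.decidableLT b) xs key]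
  rw [@PySem.List.sorted_eq_foldl_insertBy (List Int) (List Int) List.instLinearOrder.toLT LinearOrder.toDecidableLT xs key]
  rw [hb]

theorem pv_main (b_vectors : List (List Int))
    (hpre : Pre_compute_valid_b_vector_sums b_vectors) :
    compute_valid_b_vector_sums b_vectors = compute_valid_b_vector_sums_alt b_vectors := by
  cases b_vectors with
  | nil => rfl
  | cons v bs =>
    have hpre' : ∀ u ∈ v :: bs, v.length ≤ u.length := by
      intro u hu
      simpa using hpre u hu
    have hhr : (bs.length + 1) / 2 + (bs.length + 1 - (bs.length + 1) / 2) = bs.length + 1 := by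
      omega
    set masks := (v :: bs).map (pvMask v.length) with hmasks
    rw [pvAside v bs hpre', pvBside v bs]
    -- A's list, as (pvAun n).filter (pvXorsum == 0)
    have hArw : ((List.range (bs.length + 1)).flatMap
          (fun k => PySem.List.combinations (pvE (bs.length + 1)) (k + 1))).filter
          (fun c => (c.foldl (fun acc ci => acc ^^^ masks.getD ci.toNat 0) 0 == 0))
        = (pvAun (bs.length + 1)).filter (fun c => (pvXorsum masks c == 0)) := rfl
    -- B's pre-sort list is a permutation of A's list
    have hperm0 : (pvFull ((bs.length + 1) / 2) (bs.length + 1 - (bs.length + 1) / 2)).Perm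
        ([] :: pvAun (bs.length + 1)) := by
      have := pvPermFull ((bs.length + 1) / 2) (bs.length + 1 - (bs.length + 1) / 2)
      rwa [hhr] at this
    have hfilter : (([] : List Int) :: pvAun (bs.length + 1)).filter (pvPred masks)
        = (pvAun (bs.length + 1)).filter (fun c => (pvXorsum masks c == 0)) := by
      rw [List.filter_cons_of_neg (by simp [pvPred])]
      apply List.filter_congr
      intro c hc
      have hne : c ≠ [] := ((pvMemAun _ _).mp hc).2
      simp [pvPred, hne]
    have hperm : ((pvAun (bs.length + 1)).filter (fun c => (pvXorsum masks c == 0))).Perm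
        ((pvFull ((bs.length + 1) / 2) (bs.length + 1 - (bs.length + 1) / 2)).filter
          (pvPred masks)) := by
      rw [← hfilter]
      exact (hperm0.filter _).symm
    have hpair : ((pvAun (bs.length + 1)).filter
        (fun c => (pvXorsum masks c == 0))).Pairwise
        (fun a b => ((a.length : Int) :: a) < ((b.length : Int) :: b)) := by
      have := pvPairwiseT (bs.length + 1) (bs.length + 1)
      exact List.Pairwise.sublist List.filter_sublist this
    rw [hArw, pvSortedInst]
    exact (PySem.List.sorted_eq_of_perm_of_pairwise_lt _ _
      (fun c : List Int => ((c.length : Int) :: c)) hperm hpair).symm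

-- ===== VERDICT (by name: the statement is the Claim_ definition above) =====
theorem compute_valid_b_vector_sums_spec : Claim_equal_compute_valid_b_vector_sums := by
  intro b _ hpre
  exact pv_main b hpre
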